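-- pv_equiv track=rewrite | github.com/Molyleaf/MT-Photos-AI-OpenVINO | app/models.py | _extract_explicit_gpu_devices
-- ===== SOURCE A (Python) =====
-- from typing import Any, Callable, Deque, Dict, List, Literal, Optional, Tuple
--
-- def _extract_explicit_gpu_devices(device_expr: str) -> List[str]:
--     requested: List[str] = []
--     seen: set[str] = set()
--     for token in str(device_expr or "").strip().upper().replace(":", ",").split(","):
--         candidate = token.strip()
--         if not candidate.startswith("GPU.") or candidate in seen:
--             continue
--         requested.append(candidate)
--         seen.add(candidate)
--     return requested
-- ===== SOURCE B (Python) =====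
-- from typing import List
--
--
-- def _extract_explicit_gpu_devices(device_expr: str) -> List[str]:
--     gpus = [t.strip() for t in str(device_expr or "").strip().upper().replace(":", ",").split(",")]
--     gpus = [t for t in gpus if t.startswith("GPU.")]
--     return sorted(set(gpus), key=gpus.index)
-- ===== Notes on version B (the rewrite author's own statement) =====
-- stated objective: alternative
-- what changed: Instead of A's single interleaved filter-and-dedup loop with seen-set bookkeeping, B collects the qualifying tokens, collapses them to a set, and recovers the original first-occurrence order by sorting the set with key=gpus.index.
import Mathlib
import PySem

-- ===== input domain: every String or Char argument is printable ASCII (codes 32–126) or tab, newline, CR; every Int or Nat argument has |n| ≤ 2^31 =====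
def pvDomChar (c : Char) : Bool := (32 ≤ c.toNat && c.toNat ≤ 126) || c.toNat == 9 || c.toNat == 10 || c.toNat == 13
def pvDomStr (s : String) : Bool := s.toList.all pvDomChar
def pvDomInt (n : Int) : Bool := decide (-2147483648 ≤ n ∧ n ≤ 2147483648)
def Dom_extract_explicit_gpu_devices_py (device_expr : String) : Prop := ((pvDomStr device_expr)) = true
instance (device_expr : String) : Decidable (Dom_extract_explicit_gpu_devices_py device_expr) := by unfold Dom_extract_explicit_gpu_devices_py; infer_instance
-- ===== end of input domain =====

-- B replaces A's interleaved filter-and-dedup loop (seen-set bookkeeping) by a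
-- different algorithm: collect qualifying tokens, collapse to a set, and recover
-- the first-occurrence order by SORTING the set with key = gpus.index (alternative).

-- ===== PORT A =====
-- the normalization chain str(device_expr or "").strip().upper().replace(":", ",").split(",")
-- (for a str argument, 'device_expr or ""' is device_expr itself when nonempty and "" when empty,
--  and str() of a str is the identity, so the chain applies directly to device_expr)
def extract_explicit_gpu_devices_py (device_expr : String) : List String :=
  let toks := (PySem.Str.split? (PySem.Str.replace (PySem.Str.upper (PySem.Str.strip device_expr)) ":" ",") ",").getD []
  (toks.foldl
    (fun (st : List String × PySem.Set String) token =>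
      let candidate := PySem.Str.strip token
      if !(PySem.Str.startswith candidate "GPU.") || PySem.Set.contains st.2 candidate then st
      else (st.1 ++ [candidate], PySem.Set.add st.2 candidate))
    ([], PySem.Set.empty)).1

-- ===== PORT B =====
-- sorted(set(gpus), key=gpus.index): the key (first-occurrence index) is injective
-- on set(gpus), so the result is independent of the set's iteration order and the
-- port is exact with PySem.Set.ofList as the set.
def extract_explicit_gpu_devices_py_alt (device_expr : String) : List String :=
  let gpus := (((PySem.Str.split? (PySem.Str.replace (PySem.Str.upper (PySem.Str.strip device_expr)) ":" ",") ",").getD []).map PySem.Str.strip).filter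
      (fun t => PySem.Str.startswith t "GPU.")
  PySem.List.sorted (PySem.Set.ofList gpus) (fun t => (PySem.List.index? gpus t).getD 0) false

-- ===== PRECONDITION & SPEC =====
def Spec_extract_explicit_gpu_devices_py (device_expr : String) (out : List String) : Prop := out = extract_explicit_gpu_devices_py_alt device_expr
instance (device_expr : String) (out : List String) : Decidable (Spec_extract_explicit_gpu_devices_py device_expr out) := by unfold Spec_extract_explicit_gpu_devices_py; infer_instance

-- ===== CLAIM (what is proved, stated in full; the proofs are below) =====
def Claim_equal_extract_explicit_gpu_devices_py : Prop := ∀ (device_expr : String), Dom_extract_explicit_gpu_devices_py device_expr → Spec_extract_explicit_gpu_devices_py device_expr (extract_explicit_gpu_devices_py device_expr)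

-- ===== LEMMAS AND PROOFS =====

-- In A's loop the accumulator list and the seen set always hold the same list of
-- elements, so the pair-state fold collapses to a single Set.add fold.
theorem pv_fold_pair_collapse (p : String → Bool) (l : List String) (s : PySem.Set String) :
    (l.foldl
      (fun (st : List String × PySem.Set String) token =>
        if !(p (PySem.Str.strip token)) || PySem.Set.contains st.2 (PySem.Str.strip token) then st
        else (st.1 ++ [PySem.Str.strip token], PySem.Set.add st.2 (PySem.Str.strip token)))
      (s, s)).1
    = l.foldl
        (fun (s : PySem.Set String) token =>
          if p (PySem.Str.strip token) then PySem.Set.add s (PySem.Str.strip token) else s)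
        s := by
  induction l generalizing s with
  | nil => rfl
  | cons c rest ih =>
    simp only [List.foldl_cons]
    have hstep :
        (if !(p (PySem.Str.strip c)) || PySem.Set.contains s (PySem.Str.strip c) then (s, s)
         else (s ++ [PySem.Str.strip c], PySem.Set.add s (PySem.Str.strip c)))
        = ((if p (PySem.Str.strip c) then PySem.Set.add s (PySem.Str.strip c) else s),
           (if p (PySem.Str.strip c) then PySem.Set.add s (PySem.Str.strip c) else s)) := by
      by_cases hp : p (PySem.Str.strip c)
      · by_cases hm : PySem.Str.strip c ∈ s
        · simp [hp, hm, PySem.Set.add, PySem.Set.contains]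
        · simp [hp, hm, PySem.Set.add, PySem.Set.contains]
      · simp [hp]
    rw [hstep, ih]

-- A's collapsed fold is PySem.Set.ofList of the mapped-and-filtered token list.
theorem pv_ofList_filter_fold (p : String → Bool) (l : List String) :
    PySem.Set.ofList ((l.map PySem.Str.strip).filter p)
    = l.foldl
        (fun (s : PySem.Set String) token =>
          if p (PySem.Str.strip token) then PySem.Set.add s (PySem.Str.strip token) else s)
        PySem.Set.empty := by
  rw [PySem.Set.ofList_eq_foldl, List.foldl_filter, List.foldl_map]
  rfl

-- Along ofList l (first occurrences, in order of first occurrence), the first-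
-- occurrence index in l is strictly increasing.
theorem pv_ofList_pairwise_index (l : List String) :
    (PySem.Set.ofList l).Pairwise
      (fun a b => (PySem.List.index? l a).getD 0 < (PySem.List.index? l b).getD 0) := by
  induction l using List.reverseRecOn with
  | nil => simp [PySem.Set.ofList_nil]
  | append_singleton l x ih =>
    by_cases hx : x ∈ l
    · have hof : PySem.Set.ofList (l ++ [x]) = PySem.Set.ofList l := by
        rw [PySem.Set.ofList_append_singleton]
        simp [PySem.Set.add, PySem.Set.mem_ofList, hx]
      rw [hof]
      refine List.Pairwise.imp_of_mem ?_ ih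
      intro a b ha hb hab
      have ha' : a ∈ l := (PySem.Set.mem_ofList l a).1 ha
      have hb' : b ∈ l := (PySem.Set.mem_ofList l b).1 hb
      rwa [PySem.List.index?_append_of_mem _ ha', PySem.List.index?_append_of_mem _ hb']
    · have hof : PySem.Set.ofList (l ++ [x]) = PySem.Set.ofList l ++ [x] := by
        rw [PySem.Set.ofList_append_singleton]
        simp [PySem.Set.add, PySem.Set.mem_ofList, hx]
      rw [hof, List.pairwise_append]
      refine ⟨?_, by simp, ?_⟩
      · refine List.Pairwise.imp_of_mem ?_ ih
        intro a b ha hb hab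
        have ha' : a ∈ l := (PySem.Set.mem_ofList l a).1 ha
        have hb' : b ∈ l := (PySem.Set.mem_ofList l b).1 hb
        rwa [PySem.List.index?_append_of_mem _ ha', PySem.List.index?_append_of_mem _ hb']
      · intro a ha b hb
        have ha' : a ∈ l := (PySem.Set.mem_ofList l a).1 ha
        have hb' : b = x := by simpa using hb
        subst hb'
        rw [PySem.List.index?_append_of_mem _ ha',
            PySem.List.index?_append_singleton_self l b hx]
        obtain ⟨k, hk⟩ := Option.isSome_iff_exists.mp ((PySem.List.index?_isSome_iff l a).2 ha')
        obtain ⟨hlt, -, -⟩ := PySem.List.getElem_of_index?_eq_some hk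
        rw [hk]
        simpa using hlt

-- sorting the set by first-occurrence index recovers ofList's order.
theorem pv_sorted_ofList_index (l : List String) :
    PySem.List.sorted (PySem.Set.ofList l) (fun t => (PySem.List.index? l t).getD 0) false
      = PySem.Set.ofList l :=
  PySem.List.sorted_eq_of_perm_of_pairwise_lt _ _ _ (List.Perm.refl _) (pv_ofList_pairwise_index l)

-- ===== VERDICT (by name: the statement is the Claim_ definition above) =====
theorem extract_explicit_gpu_devices_py_spec : Claim_equal_extract_explicit_gpu_devices_py := by
  intro device_expr _
  unfold Spec_extract_explicit_gpu_devices_py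
  show (((PySem.Str.split? (PySem.Str.replace (PySem.Str.upper (PySem.Str.strip device_expr)) ":" ",") ",").getD []).foldl
      (fun (st : List String × PySem.Set String) token =>
        if !(PySem.Str.startswith (PySem.Str.strip token) "GPU.") || PySem.Set.contains st.2 (PySem.Str.strip token) then st
        else (st.1 ++ [PySem.Str.strip token], PySem.Set.add st.2 (PySem.Str.strip token)))
      (PySem.Set.empty, PySem.Set.empty)).1
    = PySem.List.sorted
        (PySem.Set.ofList ((((PySem.Str.split? (PySem.Str.replace (PySem.Str.upper (PySem.Str.strip device_expr)) ":" ",") ",").getD []).map PySem.Str.strip).filter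
          (fun t => PySem.Str.startswith t "GPU.")))
        (fun t => (PySem.List.index? ((((PySem.Str.split? (PySem.Str.replace (PySem.Str.upper (PySem.Str.strip device_expr)) ":" ",") ",").getD []).map PySem.Str.strip).filter
          (fun t => PySem.Str.startswith t "GPU.")) t).getD 0) false
  rw [pv_fold_pair_collapse (fun t => PySem.Str.startswith t "GPU."),
      ← pv_ofList_filter_fold (fun t => PySem.Str.startswith t "GPU."),
      pv_sorted_ofList_index]
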